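-- pv_equiv track=rewrite | github.com/WellTell539/LittleStar-AI | proactive_file_reader.py | _analyze_markdown
-- ===== SOURCE A (Python) =====
-- from typing import Dict, List, Optional, Any, Tuple
--
-- def _analyze_markdown(content: str) -> Dict[str, Any]:
--     """分析Markdown内容"""
--     features = {
--         'has_headers': '#' in content,
--         'has_links': '[' in content and '](' in content,
--         'has_code_blocks': '```' in content,
--         'has_tables': '|' in content,
--         'has_lists': any(line.strip().startswith(('- ', '* ', '+ ')) for line in content.split('\n'))
--     }
--     return features
-- ===== SOURCE B (Python) =====
-- def _analyze_markdown(content: str):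
--     """Single pass over the lines, maintaining boolean flags."""
--     headers = bracket = linkmid = code = table = lists = False
--     for line in content.split('\n'):
--         headers = headers or '#' in line
--         bracket = bracket or '[' in line
--         linkmid = linkmid or '](' in line
--         code = code or '```' in line
--         table = table or '|' in line
--         lists = lists or line.strip().startswith(('- ', '* ', '+ '))
--     return {
--         'has_headers': headers,
--         'has_links': bracket and linkmid,
--         'has_code_blocks': code,
--         'has_tables': table,
--         'has_lists': lists,
--     }
-- ===== Notes on version B (the rewrite author's own statement) =====
-- stated objective: alternative
-- what changed: Replaces six independent whole-string substring scans with a single loop over the list of lines that ORs six boolean flags per line (correct because none of the probe substrings can span a line break).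
import Mathlib
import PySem

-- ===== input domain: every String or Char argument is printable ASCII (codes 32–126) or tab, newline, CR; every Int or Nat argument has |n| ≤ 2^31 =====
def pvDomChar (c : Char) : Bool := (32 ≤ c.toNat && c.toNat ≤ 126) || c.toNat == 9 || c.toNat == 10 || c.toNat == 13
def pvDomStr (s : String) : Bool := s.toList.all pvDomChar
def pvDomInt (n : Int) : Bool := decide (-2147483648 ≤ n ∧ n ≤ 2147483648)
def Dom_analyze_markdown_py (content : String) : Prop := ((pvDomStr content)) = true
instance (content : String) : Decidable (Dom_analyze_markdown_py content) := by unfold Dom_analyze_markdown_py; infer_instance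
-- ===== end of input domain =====

-- B replaces six independent whole-string substring scans by one pass over the lines with boolean flags (alternative decomposition, same cost).


-- ===== PORT A =====
-- the per-line test 'line.strip().startswith(('- ', '* ', '+ '))'
def pvListLine (line : List Char) : Bool :=
  let s := PySem.Chars.strip line
  PySem.Chars.startswith s ['-', ' '] || PySem.Chars.startswith s ['*', ' '] || PySem.Chars.startswith s ['+', ' ']

def analyze_markdown_py (content : String) : List (String × Bool) :=
  let cs := content.toList
  [("has_headers", PySem.Chars.isIn ['#'] cs),
   ("has_links", PySem.Chars.isIn ['['] cs && PySem.Chars.isIn [']', '('] cs),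
   ("has_code_blocks", PySem.Chars.isIn ['`', '`', '`'] cs),
   ("has_tables", PySem.Chars.isIn ['|'] cs),
   ("has_lists", (PySem.Chars.splitOn cs ['\n']).any pvListLine)]

-- ===== PORT B =====
def analyze_markdown_py_alt (content : String) : List (String × Bool) :=
  let lines := PySem.Chars.splitOn content.toList ['\n']
  let r := lines.foldl
    (fun (acc : Bool × Bool × Bool × Bool × Bool × Bool) line =>
      (acc.1 || PySem.Chars.isIn ['#'] line,
       acc.2.1 || PySem.Chars.isIn ['['] line,
       acc.2.2.1 || PySem.Chars.isIn [']', '('] line,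
       acc.2.2.2.1 || PySem.Chars.isIn ['`', '`', '`'] line,
       acc.2.2.2.2.1 || PySem.Chars.isIn ['|'] line,
       acc.2.2.2.2.2 || pvListLine line))
    (false, false, false, false, false, false)
  [("has_headers", r.1),
   ("has_links", r.2.1 && r.2.2.1),
   ("has_code_blocks", r.2.2.2.1),
   ("has_tables", r.2.2.2.2.1),
   ("has_lists", r.2.2.2.2.2)]

-- ===== PRECONDITION & SPEC =====
def Spec_analyze_markdown_py (content : String) (out : List (String × Bool)) : Prop := out = analyze_markdown_py_alt content
instance (content : String) (out : List (String × Bool)) : Decidable (Spec_analyze_markdown_py content out) := by unfold Spec_analyze_markdown_py; infer_instance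

-- ===== CLAIM (what is proved, stated in full; the proofs are below) =====
def Claim_equal_analyze_markdown_py : Prop := ∀ (content : String), Dom_analyze_markdown_py content → Spec_analyze_markdown_py content (analyze_markdown_py content)

-- ===== LEMMAS AND PROOFS =====

-- a simple structural model of content.split('\n')
def pvSplit : List Char → List (List Char)
  | [] => [[]]
  | c :: rest =>
    if c = '\n' then [] :: pvSplit rest
    else
      match pvSplit rest with
      | [] => [[c]]
      | p :: ps => (c :: p) :: ps

theorem pvSplit_ne_nil (l : List Char) : pvSplit l ≠ [] := by
  cases l with
  | nil => simp [pvSplit]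
  | cons c rest =>
    simp only [pvSplit]
    split_ifs
    · simp
    · cases h : pvSplit rest <;> simp

def pvModHead (pre : List Char) : List (List Char) → List (List Char)
  | [] => [pre]
  | p :: ps => (pre ++ p) :: ps

theorem pvGo_inv : ∀ (fuel : Nat) (l cur : List Char) (acc : List (List Char)),
    l.length ≤ fuel →
    PySem.Chars.splitOn.go ['\n'] fuel l cur acc = acc.reverse ++ pvModHead cur.reverse (pvSplit l) := by
  intro fuel
  induction fuel with
  | zero =>
    intro l cur acc h
    have hl : l = [] := List.eq_nil_of_length_eq_zero (Nat.le_zero.mp h)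
    subst hl
    simp [PySem.Chars.splitOn.go, pvSplit, pvModHead]
  | succ n ih =>
    intro l cur acc h
    cases l with
    | nil => simp [PySem.Chars.splitOn.go, pvSplit, pvModHead]
    | cons c rest =>
      by_cases hc : c = '\n'
      · subst hc
        have hpre : ['\n'].isPrefixOf ('\n' :: rest) = true := by simp [List.isPrefixOf]
        rw [PySem.Chars.splitOn.go, if_pos hpre]
        simp only [List.length_cons] at h
        simp only [List.length_singleton, List.drop_succ_cons, List.drop_zero]
        rw [ih rest [] (List.reverse cur :: acc) (by omega)]
        cases hs : pvSplit rest with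
        | nil => exact absurd hs (pvSplit_ne_nil rest)
        | cons p ps => simp [pvSplit, hs, pvModHead]
      · have hpre : ['\n'].isPrefixOf (c :: rest) = false := by
          simp [List.isPrefixOf]
          exact fun hh => absurd hh.symm hc
        rw [PySem.Chars.splitOn.go, if_neg (by simp [hpre])]
        simp only [List.length_cons] at h
        rw [ih rest (c :: cur) acc (by omega)]
        cases hs : pvSplit rest with
        | nil => exact absurd hs (pvSplit_ne_nil rest)
        | cons p ps => simp [pvSplit, hs, hc, pvModHead]

theorem pvSplitOn_eq (cs : List Char) : PySem.Chars.splitOn cs ['\n'] = pvSplit cs := by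
  rw [PySem.Chars.splitOn, pvGo_inv (cs.length + 1) cs [] [] (by omega)]
  cases hs : pvSplit cs with
  | nil => exact absurd hs (pvSplit_ne_nil cs)
  | cons p ps => simp [pvModHead]

theorem pvFoldl_or {α : Type} (p : α → Bool) (l : List α) (b : Bool) :
    l.foldl (fun acc x => acc || p x) b = (b || l.any p) := by
  induction l generalizing b with
  | nil => simp
  | cons x t ih => simp [List.foldl, ih, Bool.or_assoc]

theorem pvSplit_head : ∀ (l : List Char) (p : List Char) (ps : List (List Char)),
    pvSplit l = p :: ps → p = l.takeWhile (fun c => decide (c ≠ '\n')) := by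
  intro l
  induction l with
  | nil => intro p ps h; simp [pvSplit] at h; simp [h.1]
  | cons c rest ih =>
    intro p ps h
    by_cases hc : c = '\n'
    · subst hc
      simp [pvSplit] at h
      simp [h.1, List.takeWhile]
    · simp only [pvSplit, if_neg hc] at h
      cases hs : pvSplit rest with
      | nil => exact absurd hs (pvSplit_ne_nil rest)
      | cons q qs =>
        rw [hs] at h
        simp only [List.cons.injEq] at h
        rw [← h.1, List.takeWhile_cons, if_pos (by simp [hc]), ih q qs hs]

theorem pv_infix_of_mem : ∀ (l : List Char) (q : List Char), q ∈ pvSplit l → q <:+: l := by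
  intro l
  induction l with
  | nil => intro q hq; simp [pvSplit] at hq; simp [hq]
  | cons c rest ih =>
    intro q hq
    by_cases hc : c = '\n'
    · subst hc
      simp only [pvSplit] at hq
      rcases List.mem_cons.mp hq with h | h
      · simp [h]
      · exact (ih q h).trans ⟨['\n'], [], by simp⟩
    · simp only [pvSplit, if_neg hc] at hq
      cases hs : pvSplit rest with
      | nil => exact absurd hs (pvSplit_ne_nil rest)
      | cons p ps =>
        rw [hs] at hq
        simp only [List.mem_cons] at hq
        rcases hq with h | h
        · subst h
          have hp : p <+: rest := by
            rw [pvSplit_head rest p ps hs]; exact List.takeWhile_prefix _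
          exact (List.cons_prefix_cons.mpr ⟨rfl, hp⟩).isInfix
        · exact (ih q (hs ▸ List.mem_cons_of_mem p h)).trans ⟨[c], [], by simp⟩

theorem pv_prefix_takeWhile (sub : List Char) (hn : '\n' ∉ sub) :
    ∀ (l : List Char), sub <+: l → sub <+: l.takeWhile (fun c => decide (c ≠ '\n')) := by
  induction sub with
  | nil => intro l _; exact List.nil_prefix
  | cons s ss ih =>
    intro l hp
    cases l with
    | nil => exact absurd (List.prefix_nil.mp hp) (by simp)
    | cons c l' =>
      rw [List.cons_prefix_cons] at hp
      obtain ⟨rfl, hss⟩ := hp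
      have hs : s ≠ '\n' := fun h => hn (h ▸ List.mem_cons_self)
      rw [List.takeWhile_cons, if_pos (by simp [hs]), List.cons_prefix_cons]
      exact ⟨rfl, ih (fun h => hn (List.mem_cons_of_mem s h)) l' hss⟩

theorem pv_forward (sub : List Char) (hne : sub ≠ []) (hn : '\n' ∉ sub) :
    ∀ (cs : List Char), sub <:+: cs → ∃ q ∈ pvSplit cs, sub <:+: q := by
  intro cs
  induction cs with
  | nil => intro h; exact absurd (List.eq_nil_of_infix_nil h) hne
  | cons c rest ih =>
    intro h
    rcases List.infix_cons_iff.mp h with hp | hi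
    · -- sub is a prefix of c :: rest
      cases sub with
      | nil => exact absurd rfl hne
      | cons s ss =>
        rw [List.cons_prefix_cons] at hp
        obtain ⟨rfl, hss⟩ := hp
        have hc : s ≠ '\n' := fun hh => hn (hh ▸ List.mem_cons_self)
        cases hs : pvSplit rest with
        | nil => exact absurd hs (pvSplit_ne_nil rest)
        | cons p ps =>
          refine ⟨s :: p, ?_, ?_⟩
          · simp [pvSplit, if_neg hc, hs]
          · have : ss <+: p := by
              rw [pvSplit_head rest p ps hs]
              exact pv_prefix_takeWhile ss (fun hh => hn (List.mem_cons_of_mem s hh)) rest hss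
            exact (List.cons_prefix_cons.mpr ⟨rfl, this⟩).isInfix
    · obtain ⟨q, hq, hsq⟩ := ih hi
      by_cases hc : c = '\n'
      · exact ⟨q, by simp [pvSplit, hc, hq], hsq⟩
      · cases hs : pvSplit rest with
        | nil => exact absurd hs (pvSplit_ne_nil rest)
        | cons p ps =>
          rw [hs, List.mem_cons] at hq
          rcases hq with rfl | hq
          · exact ⟨c :: q, by simp [pvSplit, if_neg hc, hs], hsq.trans ⟨[c], [], by simp⟩⟩
          · exact ⟨q, by simp [pvSplit, if_neg hc, hs, hq], hsq⟩

theorem pvAny_isIn (sub cs : List Char) (hne : sub ≠ []) (hn : '\n' ∉ sub) :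
    (pvSplit cs).any (fun l => PySem.Chars.isIn sub l) = PySem.Chars.isIn sub cs := by
  rw [Bool.eq_iff_iff]
  simp only [List.any_eq_true, PySem.Chars.isIn_iff_infix]
  constructor
  · rintro ⟨q, hq, hsq⟩
    exact hsq.trans (pv_infix_of_mem cs q hq)
  · exact pv_forward sub hne hn cs

-- ===== VERDICT (by name: the statement is the Claim_ definition above) =====
theorem analyze_markdown_py_spec : Claim_equal_analyze_markdown_py := by
  intro content _
  show analyze_markdown_py content = analyze_markdown_py_alt content
  simp only [analyze_markdown_py, analyze_markdown_py_alt]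
  rw [PySem.List.foldl_prod_mk (f := fun b line => b || PySem.Chars.isIn ['#'] line)
      (g := fun (acc : Bool × Bool × Bool × Bool × Bool) line =>
        (acc.1 || PySem.Chars.isIn ['['] line,
         acc.2.1 || PySem.Chars.isIn [']', '('] line,
         acc.2.2.1 || PySem.Chars.isIn ['`', '`', '`'] line,
         acc.2.2.2.1 || PySem.Chars.isIn ['|'] line,
         acc.2.2.2.2 || pvListLine line)),
      PySem.List.foldl_prod_mk (f := fun b line => b || PySem.Chars.isIn ['['] line)
      (g := fun (acc : Bool × Bool × Bool × Bool) line =>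
        (acc.1 || PySem.Chars.isIn [']', '('] line,
         acc.2.1 || PySem.Chars.isIn ['`', '`', '`'] line,
         acc.2.2.1 || PySem.Chars.isIn ['|'] line,
         acc.2.2.2 || pvListLine line)),
      PySem.List.foldl_prod_mk (f := fun b line => b || PySem.Chars.isIn [']', '('] line)
      (g := fun (acc : Bool × Bool × Bool) line =>
        (acc.1 || PySem.Chars.isIn ['`', '`', '`'] line,
         acc.2.1 || PySem.Chars.isIn ['|'] line,
         acc.2.2 || pvListLine line)),
      PySem.List.foldl_prod_mk (f := fun b line => b || PySem.Chars.isIn ['`', '`', '`'] line)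
      (g := fun (acc : Bool × Bool) line =>
        (acc.1 || PySem.Chars.isIn ['|'] line,
         acc.2 || pvListLine line)),
      PySem.List.foldl_prod_mk (f := fun b line => b || PySem.Chars.isIn ['|'] line)
      (g := fun (acc : Bool) line => acc || pvListLine line)]
  simp only [pvFoldl_or, Bool.false_or, pvSplitOn_eq]
  rw [pvAny_isIn ['#'] _ (by simp) (by decide),
      pvAny_isIn ['['] _ (by simp) (by decide),
      pvAny_isIn [']', '('] _ (by simp) (by decide),
      pvAny_isIn ['`', '`', '`'] _ (by simp) (by decide),
      pvAny_isIn ['|'] _ (by simp) (by decide)]
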